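-- pv_equiv track=rewrite | github.com/gujjuguru/Submiting-Assignment | prime.py | make_prime_partitions
-- ===== SOURCE A (Python) =====
-- def prime(n):
--     initial = [True] * n
--     initial[0] = initial[1] = False
--     for(i,prime) in enumerate(initial):
--         if prime:
--             yield i
--             for index in range(i * i,n,i):
--                 initial[index] = False
--
-- def make_prime_partitions(min_size):
--     primes = prime(1000000)
--     primes_sequence = [next(primes) for _ in range(min_size)]
--     start_point = 0
--     while start_point < len(primes_sequence):
--         for i in range(start_point,min_size):
--             yield primes_sequence[start_point: i +1]
--         start_point += 1
-- ===== SOURCE B (Python) =====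
-- def make_prime_partitions(min_size):
--     # B: generates primes by trial division (dividing each candidate by d while d*d <= k)
--     # instead of a sieve of Eratosthenes; the cumulative-slice double loop is kept verbatim.
--     def trial_primes(n):
--         k = 2
--         while k < n:
--             d = 2
--             is_p = True
--             while d * d <= k:
--                 if k % d == 0:
--                     is_p = False
--                     break
--                 d += 1
--             if is_p:
--                 yield k
--             k += 1
--     primes = trial_primes(1000000)
--     primes_sequence = [next(primes) for _ in range(min_size)]
--     start_point = 0
--     while start_point < len(primes_sequence):
--         for i in range(start_point, min_size):
--             yield primes_sequence[start_point: i + 1]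
--         start_point += 1
-- ===== Notes on version B (the rewrite author's own statement) =====
-- stated objective: alternative
-- what changed: The sieve-of-Eratosthenes prime generator is replaced by a trial-division prime generator (testing each candidate k by dividing by d while d*d <= k), bounded at the same 1000000; the cumulative-slice double loop is kept verbatim.
-- outside the precondition, e.g. on make_prime_partitions(1000000): A raises RuntimeError, B raises RuntimeError
import Mathlib
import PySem

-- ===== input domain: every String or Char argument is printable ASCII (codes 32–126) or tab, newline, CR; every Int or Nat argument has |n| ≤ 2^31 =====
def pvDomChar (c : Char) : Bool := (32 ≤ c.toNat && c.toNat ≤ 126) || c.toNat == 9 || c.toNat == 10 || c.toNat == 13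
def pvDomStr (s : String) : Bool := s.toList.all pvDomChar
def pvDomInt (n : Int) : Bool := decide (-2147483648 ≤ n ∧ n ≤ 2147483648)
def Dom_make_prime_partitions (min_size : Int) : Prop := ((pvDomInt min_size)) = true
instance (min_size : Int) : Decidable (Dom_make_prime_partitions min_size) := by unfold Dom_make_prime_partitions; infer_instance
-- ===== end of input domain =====

-- B replaces A's sieve-of-Eratosthenes prime generator with a trial-division prime generator
-- (the cumulative-slice double loop is kept verbatim); objective: alternative, not faster.
-- Both Pythons are generators; each port models a generator as a lazy step function
-- (state → Option (value, next state)), advanced exactly as `next` does.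

-- ===== PORT A =====
-- inner `for index in range(i*i, n, i): initial[index] = False`
def sieveMark (arr : Array Bool) (p : Nat) : Array Bool :=
  (PySem.List.pyRange ((p * p : Nat) : Int) ((arr.size : Nat) : Int) ((p : Nat) : Int)).foldl
    (fun a idx => a.setIfInBounds idx.toNat false) arr

-- one `next()` of the generator `prime`: resume the `for (i, prime) in enumerate(initial)` scan
-- at position i; at the first true entry, yield it after marking its multiples
def sieveNext (arr : Array Bool) (i : Nat) : Option (Int × (Array Bool × Nat)) :=
  if h : i < arr.size then
    if arr[i] then some ((i : Int), (sieveMark arr i, i + 1))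
    else sieveNext arr (i + 1)
  else none
termination_by arr.size - i

-- initial = [True] * 1000000 ; initial[0] = initial[1] = False
def sieveInit : Array Bool :=
  ((Array.replicate 1000000 true).setIfInBounds 0 false).setIfInBounds 1 false

-- `[next(primes) for _ in range(min_size)]` — this comprehension is verbatim in both Pythons,
-- so both ports share it (none = StopIteration: outside Pre_)
def pvCollect {σ : Type} (step : σ → Option (Int × σ)) : Nat → σ → List Int
  | 0, _ => []
  | n + 1, s =>
    match step s with
    | none => []
    | some (p, s') => p :: pvCollect step n s'

-- `while start_point < len(primes_sequence): for i in range(start_point, min_size):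
--    yield primes_sequence[start_point : i + 1]` — this double loop is verbatim identical
-- in A and in B, so both ports share it
def yieldParts (seq : List Int) (min_size : Int) : List (List Int) :=
  (List.range seq.length).foldl
    (fun acc start_point =>
      (PySem.List.pyRange ((start_point : Nat) : Int) min_size 1).foldl
        (fun acc2 i => acc2 ++ [PySem.List.slice seq (some ((start_point : Nat) : Int)) (some (i + 1))])
        acc)
    []

def make_prime_partitions (min_size : Int) : List (List Int) :=
  yieldParts (pvCollect (fun s => sieveNext s.1 s.2) min_size.toNat (sieveInit, 0)) min_size

-- ===== PORT B =====
-- inner `while d*d <= k: if k % d == 0: break; d += 1` of Source B's trial_primes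
def trialDiv (k d : Nat) : Bool :=
  if d * d ≤ k then (if k % d = 0 then false else trialDiv k (d + 1)) else true
termination_by k + 1 - d
decreasing_by
  rcases Nat.eq_zero_or_pos d with h0 | h0
  · omega
  · have := Nat.le_mul_of_pos_left d h0; omega

-- one `next()` of Source B's generator trial_primes: resume `while k < n` at candidate k,
-- yield the first k that survives trial division
def trialNext (k : Nat) : Option (Int × Nat) :=
  if k < 1000000 then
    (if trialDiv k 2 then some ((k : Int), k + 1) else trialNext (k + 1))
  else none
termination_by 1000000 - k

def make_prime_partitions_alt (min_size : Int) : List (List Int) :=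
  yieldParts (pvCollect trialNext min_size.toNat 2) min_size

-- ===== PRECONDITION & SPEC =====
-- Pre_ excludes exactly the inputs where Python A raises: there are 78498 primes below
-- 1000000, so for min_size > 78498 the generator is exhausted and `next` raises
-- StopIteration (→ RuntimeError). B raises there too.
def Pre_make_prime_partitions (min_size : Int) : Prop := min_size ≤ 78498
instance (min_size : Int) : Decidable (Pre_make_prime_partitions min_size) := by
  unfold Pre_make_prime_partitions; infer_instance
def pvWitness_make_prime_partitions : Int := (6)

def Spec_make_prime_partitions (min_size : Int) (out : List (List Int)) : Prop := out = make_prime_partitions_alt min_size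
instance (min_size : Int) (out : List (List Int)) : Decidable (Spec_make_prime_partitions min_size out) := by unfold Spec_make_prime_partitions; infer_instance

-- ===== CLAIM (what is proved, stated in full; the proofs are below) =====
def Claim_equal_make_prime_partitions : Prop := ∀ (min_size : Int), Dom_make_prime_partitions min_size → Pre_make_prime_partitions min_size → Spec_make_prime_partitions min_size (make_prime_partitions min_size)

-- ===== LEMMAS AND PROOFS =====

-- Invariant of the sieve generator state (arr, i): entries processed so far have crossed
-- off exactly the numbers with a proper prime divisor below i.
def SieveInv (arr : Array Bool) (i : Nat) : Prop :=
  arr.size = 1000000 ∧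
  ∀ j (hj : j < arr.size),
    (arr[j] = true ↔ (2 ≤ j ∧ ∀ p, Nat.Prime p → p ∣ j → p < i → p = j))

lemma foldl_mark_size (L : List Int) (arr : Array Bool) :
    (L.foldl (fun a idx => a.setIfInBounds idx.toNat false) arr).size = arr.size := by
  induction L generalizing arr with
  | nil => rfl
  | cons x L ih => simp [ih, Array.size_setIfInBounds]

lemma foldl_mark_get (L : List Int) (arr : Array Bool) (j : Nat)
    (hL : ∀ x ∈ L, 0 ≤ x) (hj : j < arr.size) :
    (L.foldl (fun a idx => a.setIfInBounds idx.toNat false) arr)[j]'(by rw [foldl_mark_size]; exact hj)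
      = if (j : Int) ∈ L then false else arr[j] := by
  induction L generalizing arr with
  | nil => simp
  | cons x L ih =>
    have hx : 0 ≤ x := hL x (by simp)
    simp only [List.foldl_cons]
    rw [ih (arr.setIfInBounds x.toNat false) (fun y hy => hL y (by simp [hy]))
        (by simpa [Array.size_setIfInBounds] using hj)]
    by_cases hmem : (j : Int) ∈ L
    · simp [hmem]
    · by_cases hxj : x = (j : Int)
      · have hxt : x.toNat = j := by omega
        rw [Array.getElem_setIfInBounds hj]
        simp [hmem, hxj]
      · have hxt : x.toNat ≠ j := by omega
        have hjx : ¬ ((j : Int) = x) := fun h => hxj h.symm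
        rw [Array.getElem_setIfInBounds hj]
        simp [hmem, hxt, hjx]

lemma sieveMark_size (arr : Array Bool) (p : Nat) : (sieveMark arr p).size = arr.size :=
  foldl_mark_size _ _

lemma sieveMark_get (arr : Array Bool) (p j : Nat) (hp : 0 < p) (hj : j < arr.size) :
    (sieveMark arr p)[j]'(by rw [sieveMark_size]; exact hj)
      = if p * p ≤ j ∧ p ∣ j then false else arr[j] := by
  have hps : (0 : Int) < ((p : Nat) : Int) := by exact_mod_cast hp
  have hmem : ((j : Int) ∈ PySem.List.pyRange ((p * p : Nat) : Int) ((arr.size : Nat) : Int) ((p : Nat) : Int))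
      ↔ (p * p ≤ j ∧ p ∣ j) := by
    rw [PySem.List.mem_pyRange_iff_of_pos hps]
    constructor
    · rintro ⟨h1, _, h3⟩
      refine ⟨by exact_mod_cast h1, ?_⟩
      have hdvd : (p : Int) ∣ (j : Int) := by
        have hsq : (p : Int) ∣ ((p * p : Nat) : Int) := by push_cast; exact Dvd.intro _ rfl
        have := dvd_add h3 hsq
        simpa using this
      exact_mod_cast hdvd
    · rintro ⟨h1, h2⟩
      refine ⟨by exact_mod_cast h1, by exact_mod_cast hj, ?_⟩
      have hdj : (p : Int) ∣ (j : Int) := by exact_mod_cast h2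
      have hsq : (p : Int) ∣ ((p * p : Nat) : Int) := by push_cast; exact Dvd.intro _ rfl
      exact dvd_sub hdj hsq
  unfold sieveMark
  rw [foldl_mark_get _ _ _ (fun x hx => by
        have := (PySem.List.mem_pyRange_iff_of_pos hps x).mp hx
        have h1 : ((p * p : Nat) : Int) ≤ x := this.1
        exact le_trans (by positivity) h1) hj]
  simp only [hmem]

lemma sieveInit_size : sieveInit.size = 1000000 := by
  simp [sieveInit, Array.size_setIfInBounds]

lemma sieveInit_get (j : Nat) (hj : j < sieveInit.size) :
    sieveInit[j] = decide (2 ≤ j) := by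
  have hj' : j < 1000000 := by rwa [sieveInit_size] at hj
  have hsz0 : j < (Array.replicate 1000000 true).size := by rwa [Array.size_replicate]
  have hsz : j < ((Array.replicate 1000000 true).setIfInBounds 0 false).size := by
    rwa [Array.size_setIfInBounds]
  simp only [sieveInit]
  rw [Array.getElem_setIfInBounds hsz, Array.getElem_setIfInBounds hsz0,
    Array.getElem_replicate]
  split_ifs with h1 h0
  · symm; simp only [decide_eq_false_iff_not]; omega
  · symm; simp only [decide_eq_false_iff_not]; omega
  · symm; simp only [decide_eq_true_eq]; omega

lemma inv_init : SieveInv sieveInit 2 := by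
  refine ⟨sieveInit_size, fun j hj => ?_⟩
  rw [sieveInit_get j hj]
  simp only [decide_eq_true_eq]
  constructor
  · intro h2
    exact ⟨h2, fun p hp _ hlt => absurd hlt (by have := hp.two_le; omega)⟩
  · rintro ⟨h2, -⟩; exact h2

lemma inv_not_prime {arr : Array Bool} {i : Nat} (h : SieveInv arr i)
    (hnp : ¬ Nat.Prime i) : SieveInv arr (i + 1) := by
  refine ⟨h.1, fun j hj => ?_⟩
  rw [h.2 j hj]
  constructor
  · rintro ⟨h2, hall⟩
    refine ⟨h2, fun p hp hd hlt => ?_⟩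
    rcases Nat.lt_succ_iff_lt_or_eq.mp hlt with hlt' | heq
    · exact hall p hp hd hlt'
    · exact absurd (heq ▸ hp) hnp
  · rintro ⟨h2, hall⟩
    exact ⟨h2, fun p hp hd hlt => hall p hp hd (by omega)⟩

lemma no_proper_prime_divisor_iff {i : Nat} (h2 : 2 ≤ i) :
    (∀ p, Nat.Prime p → p ∣ i → p < i → p = i) ↔ Nat.Prime i := by
  constructor
  · intro hall
    by_contra hnp
    have hmf : Nat.Prime i.minFac := Nat.minFac_prime (by omega)
    have hdvd : i.minFac ∣ i := Nat.minFac_dvd i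
    have hle : i.minFac ≤ i := Nat.minFac_le (by omega)
    have hne : i.minFac ≠ i := fun he => hnp (Nat.prime_def_minFac.mpr ⟨h2, he⟩)
    exact hne (hall _ hmf hdvd (by omega))
  · intro hp p hpp hd _
    rcases (Nat.Prime.eq_one_or_self_of_dvd hp p hd) with h1 | h1
    · exact absurd h1 hpp.ne_one
    · exact h1

lemma inv_get_prime {arr : Array Bool} {i : Nat} (h : SieveInv arr i) (h2 : 2 ≤ i)
    (hi : i < arr.size) : (arr[i] = true ↔ Nat.Prime i) := by
  rw [h.2 i hi]
  constructor
  · rintro ⟨-, hall⟩; exact (no_proper_prime_divisor_iff h2).mp hall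
  · intro hp; exact ⟨h2, (no_proper_prime_divisor_iff h2).mpr hp⟩

lemma inv_mark {arr : Array Bool} {i : Nat} (h : SieveInv arr i) (hp : Nat.Prime i) :
    SieveInv (sieveMark arr i) (i + 1) := by
  have h2i : 2 ≤ i := hp.two_le
  refine ⟨by rw [sieveMark_size]; exact h.1, fun j hj => ?_⟩
  have hj' : j < arr.size := by rwa [sieveMark_size] at hj
  rw [sieveMark_get arr i j (by omega) hj']
  by_cases hm : i * i ≤ j ∧ i ∣ j
  · rw [if_pos hm]
    constructor
    · intro hfalse; exact absurd hfalse (by simp)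
    · rintro ⟨hj2, hall⟩
      have heq : i = j := hall i hp hm.2 (by omega)
      have hlt : i < i * i := by nlinarith
      omega
  · simp only [hm, if_false]
    rw [h.2 j hj']
    constructor
    · rintro ⟨hj2, hall⟩
      refine ⟨hj2, fun p hpp hd hlt => ?_⟩
      rcases Nat.lt_succ_iff_lt_or_eq.mp hlt with hlt' | heq
      · exact hall p hpp hd hlt'
      · subst heq
        -- p = i divides j and j is unmarked, so j = i
        by_contra hne
        rcases hd with ⟨m, rfl⟩
        have hm0 : m ≠ 0 := by rintro rfl; omega
        have hm1 : m ≠ 1 := by rintro rfl; exact hne (by ring)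
        have hm2 : 2 ≤ m := by omega
        have hji : p * m < p * p := by
          by_contra hge
          exact hm ⟨by omega, Dvd.intro m rfl⟩
        have hmp : m < p := by
          have := Nat.lt_of_mul_lt_mul_left hji
          exact this
        have hmfp : Nat.Prime m.minFac := Nat.minFac_prime (by omega)
        have hmfd : m.minFac ∣ p * m := Dvd.dvd.mul_left (Nat.minFac_dvd m) p
        have hmfl : m.minFac < p := lt_of_le_of_lt (Nat.minFac_le (by omega)) hmp
        have hle : m.minFac ≤ m := Nat.minFac_le (by omega)
        have heq2 := hall m.minFac hmfp hmfd hmfl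
        nlinarith [hp.two_le]
    · rintro ⟨hj2, hall⟩
      exact ⟨hj2, fun p hpp hd hlt => hall p hpp hd (by omega)⟩

lemma trialDiv_iff_aux : ∀ n k d, k + 1 - d ≤ n →
    (trialDiv k d = true ↔ ∀ m, d ≤ m → m * m ≤ k → ¬ m ∣ k) := by
  intro n
  induction n with
  | zero =>
    intro k d hn
    have hd : k + 1 ≤ d := by omega
    rw [trialDiv]
    have hdd : ¬ d * d ≤ k := by nlinarith
    rw [if_neg hdd]
    simp only [true_iff]
    intro m hm hmm hdvd
    have h1 : m ≤ m * m := Nat.le_mul_of_pos_left m (by omega)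
    omega
  | succ n ih =>
    intro k d hn
    rw [trialDiv]
    by_cases hdd : d * d ≤ k
    · rw [if_pos hdd]
      by_cases hmod : k % d = 0
      · have hdvd : d ∣ k := Nat.dvd_of_mod_eq_zero hmod
        rw [if_pos hmod]
        constructor
        · intro h; exact absurd h (by simp)
        · intro hall; exact (hall d (le_refl d) hdd hdvd).elim
      · rw [if_neg hmod]
        rw [ih k (d + 1) (by omega)]
        constructor
        · intro hall m hm hmm hdvd
          rcases Nat.eq_or_lt_of_le hm with rfl | hlt
          · exact hmod (by rcases hdvd with ⟨c, rfl⟩; simp [Nat.mul_mod_right])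
          · exact hall m hlt hmm hdvd
        · intro hall m hm hmm hdvd
          exact hall m (by omega) hmm hdvd
    · rw [if_neg hdd]
      simp only [true_iff]
      intro m hm hmm hdvd
      exact hdd (le_trans (Nat.mul_le_mul hm hm) hmm)

lemma trialDiv_iff (k d : Nat) :
    trialDiv k d = true ↔ ∀ m, d ≤ m → m * m ≤ k → ¬ m ∣ k :=
  trialDiv_iff_aux (k + 1 - d) k d (le_refl _)

lemma trial_prime (k : Nat) (h2 : 2 ≤ k) : (trialDiv k 2 = true ↔ Nat.Prime k) := by
  rw [trialDiv_iff]
  rw [Nat.prime_def_le_sqrt]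
  constructor
  · intro hall
    exact ⟨h2, fun m hm hms => hall m hm (Nat.le_sqrt.mp hms)⟩
  · rintro ⟨-, hall⟩ m hm hms
    exact hall m hm (Nat.le_sqrt.mpr hms)

lemma step_agree : ∀ n i arr, 1000000 - i ≤ n → SieveInv arr i → 2 ≤ i →
    (sieveNext arr i = none ∧ trialNext i = none) ∨
    (∃ q arr', Nat.Prime q ∧ i ≤ q ∧
      sieveNext arr i = some ((q : Int), (arr', q + 1)) ∧
      trialNext i = some ((q : Int), q + 1) ∧ SieveInv arr' (q + 1)) := by
  intro n
  induction n with
  | zero =>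
    intro i arr hn hinv h2
    have hi : ¬ i < arr.size := by rw [hinv.1]; omega
    left
    constructor
    · rw [sieveNext]; simp [hi]
    · rw [trialNext]; have : ¬ i < 1000000 := by omega
      simp [this]
  | succ n ih =>
    intro i arr hn hinv h2
    by_cases hi : i < 1000000
    · have hi' : i < arr.size := by rw [hinv.1]; exact hi
      by_cases hp : Nat.Prime i
      · right
        refine ⟨i, sieveMark arr i, hp, le_refl i, ?_, ?_, inv_mark hinv hp⟩
        · rw [sieveNext]
          simp [hi', (inv_get_prime hinv h2 hi').mpr hp]
        · rw [trialNext]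
          simp [hi, (trial_prime i h2).mpr hp]
      · have hs : sieveNext arr i = sieveNext arr (i + 1) := by
          rw [sieveNext]
          have : arr[i] = false := by
            cases hb : arr[i]
            · rfl
            · exact absurd ((inv_get_prime hinv h2 hi').mp hb) hp
          simp [hi', this]
        have ht : trialNext i = trialNext (i + 1) := by
          rw [trialNext]
          have : trialDiv i 2 = false := by
            cases hb : trialDiv i 2
            · rfl
            · exact absurd ((trial_prime i h2).mp hb) hp
          simp [hi, this]
        rw [hs, ht]
        rcases ih (i + 1) arr (by omega) (inv_not_prime hinv hp) (by omega) with hcase | hcase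
        · exact Or.inl hcase
        · rcases hcase with ⟨q, arr', hq, hle, e1, e2, e3⟩
          exact Or.inr ⟨q, arr', hq, by omega, e1, e2, e3⟩
    · left
      have hi' : ¬ i < arr.size := by rw [hinv.1]; omega
      constructor
      · rw [sieveNext]; simp [hi']
      · rw [trialNext]; simp [hi]

lemma collect_agree : ∀ fuel i j arr, SieveInv arr j → 2 ≤ j →
    sieveNext arr i = sieveNext arr j →
    pvCollect (fun s => sieveNext s.1 s.2) fuel (arr, i) = pvCollect trialNext fuel j := by
  intro fuel
  induction fuel with
  | zero => intro i j arr _ _ _; rfl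
  | succ fuel ih =>
    intro i j arr hinv h2 hij
    simp only [pvCollect]
    rw [hij]
    rcases step_agree 1000000 j arr (by omega) hinv h2 with ⟨e1, e2⟩ | ⟨q, arr', hq, hle, e1, e2, e3⟩
    · rw [e1, e2]
    · rw [e1, e2]
      dsimp only
      rw [ih (q + 1) (q + 1) arr' e3 (by have := hq.two_le; omega) rfl]

lemma sieveNext_skip (arr : Array Bool) (i : Nat) (hi : i < arr.size)
    (hfalse : arr[i] = false) : sieveNext arr i = sieveNext arr (i + 1) := by
  rw [sieveNext, dif_pos hi, hfalse]
  simp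

lemma sieve_start : sieveNext sieveInit 0 = sieveNext sieveInit 2 := by
  have h0 : (0 : Nat) < sieveInit.size := by rw [sieveInit_size]; omega
  have h1 : (1 : Nat) < sieveInit.size := by rw [sieveInit_size]; omega
  rw [sieveNext_skip sieveInit 0 h0 (by rw [sieveInit_get 0 h0]; rfl),
    sieveNext_skip sieveInit 1 h1 (by rw [sieveInit_get 1 h1]; rfl)]

lemma seq_eq (f : Nat) :
    pvCollect (fun s => sieveNext s.1 s.2) f (sieveInit, 0) = pvCollect trialNext f 2 :=
  collect_agree f 0 2 sieveInit inv_init (by omega) sieve_start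

-- ===== VERDICT (by name: the statement is the Claim_ definition above) =====
theorem make_prime_partitions_spec : Claim_equal_make_prime_partitions := by
  intro min_size _ _
  unfold Spec_make_prime_partitions make_prime_partitions make_prime_partitions_alt
  rw [seq_eq]
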